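-- pv_equiv track=rewrite | github.com/AlexandreSenpai/Enma | NHentai/base_wrapper.py | _get_lang_by_title
-- ===== SOURCE A (Python) =====
-- def _get_lang_by_title(title: str) -> str:
--     """This method runs through the title inputed and search by
--     one of supported languages if it doesnt finds the methods returns
--     Japanese.
--     """
--
--     SUPORTED_LANG = {'English': 'english', 'Chinese': 'chinese'}
--
--     acceptable_title = title.replace('[', '').replace(']', '')
--     partitoned_title = acceptable_title.split(' ')
--
--     lang = 'japanese'
--
--     for part in partitoned_title:
--         current_language_key = SUPORTED_LANG.get(part)
--         lang = current_language_key if current_language_key is not None else lang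
--
--     return lang
-- ===== SOURCE B (Python) =====
-- def _get_lang_by_title(title: str) -> str:
--     """Reverse scan with early return: the last supported-language word wins,
--     so scanning from the end and returning the first hit gives the same result."""
--     SUPORTED_LANG = {'English': 'english', 'Chinese': 'chinese'}
--     for part in reversed(title.replace('[', '').replace(']', '').split(' ')):
--         if part in SUPORTED_LANG:
--             return SUPORTED_LANG[part]
--     return 'japanese'
-- ===== Notes on version B (the rewrite author's own statement) =====
-- stated objective: alternative
-- what changed: Replaces the forward last-wins accumulator fold over all words with a reverse scan that returns the first supported-language word immediately (early exit, no accumulator).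
import Mathlib
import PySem

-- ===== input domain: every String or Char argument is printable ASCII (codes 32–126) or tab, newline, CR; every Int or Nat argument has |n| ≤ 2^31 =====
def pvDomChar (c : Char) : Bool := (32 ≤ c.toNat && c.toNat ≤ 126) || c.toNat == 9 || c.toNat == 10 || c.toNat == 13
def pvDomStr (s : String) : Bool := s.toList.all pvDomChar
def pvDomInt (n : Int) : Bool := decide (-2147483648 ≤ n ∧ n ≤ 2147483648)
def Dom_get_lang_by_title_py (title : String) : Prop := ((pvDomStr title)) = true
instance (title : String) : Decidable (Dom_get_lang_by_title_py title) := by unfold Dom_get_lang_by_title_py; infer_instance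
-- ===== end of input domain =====

-- ===== PORT A =====
-- B changes decomposition: A folds forward keeping a last-wins accumulator; B scans the reversed word list and returns the first hit.
def get_lang_by_title_py (title : String) : String :=
  let SUPORTED_LANG : PySem.Dict String String :=
    PySem.Dict.ofList [("English", "english"), ("Chinese", "chinese")]
  let acceptable_title := PySem.Str.replace (PySem.Str.replace title "[" "") "]" ""
  -- s.split(' '): sep ≠ "", so split? is always some; getD [] is the faithful unwrap
  let partitoned_title := (PySem.Str.split? acceptable_title " ").getD []
  partitoned_title.foldl
    (fun lang part =>
      match SUPORTED_LANG.get? part with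
      | some v => v
      | none => lang)
    "japanese"

-- ===== PORT B =====
-- first-hit scan over the reversed word list; "japanese" if no word matches
def altScan : List String → String
  | [] => "japanese"
  | part :: rest =>
    match (PySem.Dict.ofList [("English", "english"), ("Chinese", "chinese")]).get? part with
    | some v => v
    | none => altScan rest

def get_lang_by_title_py_alt (title : String) : String :=
  altScan ((PySem.Str.split? (PySem.Str.replace (PySem.Str.replace title "[" "") "]" "") " ").getD []).reverse

-- ===== PRECONDITION & SPEC =====
def Spec_get_lang_by_title_py (title : String) (out : String) : Prop := out = get_lang_by_title_py_alt title
instance (title : String) (out : String) : Decidable (Spec_get_lang_by_title_py title out) := by unfold Spec_get_lang_by_title_py; infer_instance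

-- ===== CLAIM (what is proved, stated in full; the proofs are below) =====
def Claim_equal_get_lang_by_title_py : Prop := ∀ (title : String), Dom_get_lang_by_title_py title → Spec_get_lang_by_title_py title (get_lang_by_title_py title)

-- ===== LEMMAS AND PROOFS =====

-- ===== VERDICT (by name: the statement is the Claim_ definition above) =====
def goScan (l : List String) (init : String) : String :=
  match l with
  | [] => init
  | p :: rest =>
    match (PySem.Dict.ofList [("English", "english"), ("Chinese", "chinese")]).get? p with
    | some v => v
    | none => goScan rest init

lemma goScan_append_singleton (l : List String) (p init : String) :
    goScan (l ++ [p]) init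
      = goScan l (match (PySem.Dict.ofList [("English", "english"), ("Chinese", "chinese")]).get? p with | some v => v | none => init) := by
  induction l generalizing init with
  | nil => simp [goScan]
  | cons q l ih =>
    simp only [List.cons_append, goScan]
    cases (PySem.Dict.ofList [("English", "english"), ("Chinese", "chinese")]).get? q with
    | some v => rfl
    | none => exact ih init

lemma foldl_eq_goScan (l : List String) (init : String) :
    l.foldl (fun lang part =>
      match (PySem.Dict.ofList [("English", "english"), ("Chinese", "chinese")]).get? part with
      | some v => v
      | none => lang) init = goScan l.reverse init := by
  induction l generalizing init with
  | nil => rfl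
  | cons p l ih =>
    simp only [List.foldl_cons, List.reverse_cons]
    rw [goScan_append_singleton, ih]

lemma altScan_eq_goScan (l : List String) : altScan l = goScan l "japanese" := by
  induction l with
  | nil => rfl
  | cons p l ih =>
    simp only [altScan, goScan]
    cases (PySem.Dict.ofList [("English", "english"), ("Chinese", "chinese")]).get? p with
    | some v => rfl
    | none => exact ih

theorem get_lang_by_title_py_spec : Claim_equal_get_lang_by_title_py := by
  intro title _
  unfold Spec_get_lang_by_title_py get_lang_by_title_py get_lang_by_title_py_alt
  rw [altScan_eq_goScan]
  exact foldl_eq_goScan _ _
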